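-- pv_equiv track=rewrite | github.com/thabnir/ApartMatch | realtor.py | realtor_round_down
-- ===== SOURCE A (Python) =====
-- def realtor_round_down(n):
--     if n < 0:
--         return 0
--     if n > 10000:
--         return 10000
--     targets = list(reversed([0, 100, 200, 300, 400, 500, 600, 700, 800, 900, 1000, 1200, 1400, 1600, 1800, 2000, 2500, 3000, 3500, 4000, 4500, 5000, 6000, 7000, 8000, 9000, 10000]))
--     for target in targets:
--         if n >= target:
--             return target
-- ===== SOURCE B (Python) =====
-- def realtor_round_down(n):
--     # closed-form bucket arithmetic instead of a linear scan over the bucket list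
--     if n < 0:
--         return 0
--     if n > 10000:
--         return 10000
--     if n < 1000:
--         return n // 100 * 100
--     if n < 2000:
--         return n // 200 * 200
--     if n < 5000:
--         return n // 500 * 500
--     return n // 1000 * 1000
-- ===== Notes on version B (the rewrite author's own statement) =====
-- stated objective: simpler
-- what changed: Replaced the linear scan over the reversed bucket list with closed-form arithmetic: after the two guards, floor n to the step size of its price band (100 below 1000, 200 below 2000, 500 below 5000, 1000 above).
import Mathlib
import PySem

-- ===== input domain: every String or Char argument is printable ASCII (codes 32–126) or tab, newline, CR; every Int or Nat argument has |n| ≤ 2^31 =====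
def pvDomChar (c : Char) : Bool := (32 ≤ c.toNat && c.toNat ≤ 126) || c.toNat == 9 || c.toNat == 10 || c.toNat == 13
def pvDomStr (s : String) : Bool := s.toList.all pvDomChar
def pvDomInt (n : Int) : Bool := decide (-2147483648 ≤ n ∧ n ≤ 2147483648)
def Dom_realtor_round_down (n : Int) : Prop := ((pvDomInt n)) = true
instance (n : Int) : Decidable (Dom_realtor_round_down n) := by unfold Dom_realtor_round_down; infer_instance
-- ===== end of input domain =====

set_option maxHeartbeats 1000000


-- B replaces A's linear scan over the descending bucket list by closed-form arithmetic
-- (floor to the step size of the price band n falls in); simpler, same exact values.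

-- ===== PORT A =====
-- first target in the list with n >= target; [] unreachable in A (list ends with 0, n ≥ 0),
-- the 0 default is never used on admitted inputs
def realtorScanA : List Int → Int → Int
  | [], _ => 0
  | t :: ts, n => if n ≥ t then t else realtorScanA ts n

def realtor_round_down (n : Int) : Int :=
  if n < 0 then 0
  else if n > 10000 then 10000
  else realtorScanA
    ([0, 100, 200, 300, 400, 500, 600, 700, 800, 900, 1000, 1200, 1400, 1600, 1800,
      2000, 2500, 3000, 3500, 4000, 4500, 5000, 6000, 7000, 8000, 9000, 10000].reverse) n

-- ===== PORT B =====
def realtor_round_down_alt (n : Int) : Int :=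
  if n < 0 then 0
  else if n > 10000 then 10000
  else if n < 1000 then PySem.Int.floordiv n 100 * 100
  else if n < 2000 then PySem.Int.floordiv n 200 * 200
  else if n < 5000 then PySem.Int.floordiv n 500 * 500
  else PySem.Int.floordiv n 1000 * 1000

-- ===== PRECONDITION & SPEC =====
def Spec_realtor_round_down (n : Int) (out : Int) : Prop := out = realtor_round_down_alt n
instance (n : Int) (out : Int) : Decidable (Spec_realtor_round_down n out) := by unfold Spec_realtor_round_down; infer_instance

-- ===== CLAIM (what is proved, stated in full; the proofs are below) =====
def Claim_equal_realtor_round_down : Prop := ∀ (n : Int), Dom_realtor_round_down n → Spec_realtor_round_down n (realtor_round_down n)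

-- ===== LEMMAS AND PROOFS =====
theorem scan_cons (t : Int) (ts : List Int) (n : Int) :
    realtorScanA (t :: ts) n = if n ≥ t then t else realtorScanA ts n := rfl

theorem scan_nil (n : Int) : realtorScanA [] n = 0 := rfl

-- ===== VERDICT (by name: the statement is the Claim_ definition above) =====
theorem realtor_round_down_spec : Claim_equal_realtor_round_down := by
  intro n _
  unfold Spec_realtor_round_down realtor_round_down realtor_round_down_alt
  by_cases h0 : n < 0
  · simp [h0]
  · by_cases h1 : n > 10000
    · simp [h0, h1]
    · have hrev : ([0, 100, 200, 300, 400, 500, 600, 700, 800, 900, 1000, 1200, 1400,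
          1600, 1800, 2000, 2500, 3000, 3500, 4000, 4500, 5000, 6000, 7000, 8000, 9000,
          10000] : List Int).reverse =
          [10000, 9000, 8000, 7000, 6000, 5000, 4500, 4000, 3500, 3000, 2500, 2000, 1800,
           1600, 1400, 1200, 1000, 900, 800, 700, 600, 500, 400, 300, 200, 100, 0] := by rfl
      rw [if_neg h0, if_neg h1, hrev,
          PySem.Int.floordiv_eq_ediv_of_pos (a := n) (by norm_num : (0:Int) < 100),
          PySem.Int.floordiv_eq_ediv_of_pos (a := n) (by norm_num : (0:Int) < 200),
          PySem.Int.floordiv_eq_ediv_of_pos (a := n) (by norm_num : (0:Int) < 500),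
          PySem.Int.floordiv_eq_ediv_of_pos (a := n) (by norm_num : (0:Int) < 1000)]
      rw [scan_cons]
      by_cases hk0 : n ≥ (10000 : Int)
      · rw [if_pos hk0]; split_ifs <;> omega
      rw [if_neg hk0]
      rw [scan_cons]
      by_cases hk1 : n ≥ (9000 : Int)
      · rw [if_pos hk1]; split_ifs <;> omega
      rw [if_neg hk1]
      rw [scan_cons]
      by_cases hk2 : n ≥ (8000 : Int)
      · rw [if_pos hk2]; split_ifs <;> omega
      rw [if_neg hk2]
      rw [scan_cons]
      by_cases hk3 : n ≥ (7000 : Int)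
      · rw [if_pos hk3]; split_ifs <;> omega
      rw [if_neg hk3]
      rw [scan_cons]
      by_cases hk4 : n ≥ (6000 : Int)
      · rw [if_pos hk4]; split_ifs <;> omega
      rw [if_neg hk4]
      rw [scan_cons]
      by_cases hk5 : n ≥ (5000 : Int)
      · rw [if_pos hk5]; split_ifs <;> omega
      rw [if_neg hk5]
      rw [scan_cons]
      by_cases hk6 : n ≥ (4500 : Int)
      · rw [if_pos hk6]; split_ifs <;> omega
      rw [if_neg hk6]
      rw [scan_cons]
      by_cases hk7 : n ≥ (4000 : Int)
      · rw [if_pos hk7]; split_ifs <;> omega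
      rw [if_neg hk7]
      rw [scan_cons]
      by_cases hk8 : n ≥ (3500 : Int)
      · rw [if_pos hk8]; split_ifs <;> omega
      rw [if_neg hk8]
      rw [scan_cons]
      by_cases hk9 : n ≥ (3000 : Int)
      · rw [if_pos hk9]; split_ifs <;> omega
      rw [if_neg hk9]
      rw [scan_cons]
      by_cases hk10 : n ≥ (2500 : Int)
      · rw [if_pos hk10]; split_ifs <;> omega
      rw [if_neg hk10]
      rw [scan_cons]
      by_cases hk11 : n ≥ (2000 : Int)
      · rw [if_pos hk11]; split_ifs <;> omega
      rw [if_neg hk11]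
      rw [scan_cons]
      by_cases hk12 : n ≥ (1800 : Int)
      · rw [if_pos hk12]; split_ifs <;> omega
      rw [if_neg hk12]
      rw [scan_cons]
      by_cases hk13 : n ≥ (1600 : Int)
      · rw [if_pos hk13]; split_ifs <;> omega
      rw [if_neg hk13]
      rw [scan_cons]
      by_cases hk14 : n ≥ (1400 : Int)
      · rw [if_pos hk14]; split_ifs <;> omega
      rw [if_neg hk14]
      rw [scan_cons]
      by_cases hk15 : n ≥ (1200 : Int)
      · rw [if_pos hk15]; split_ifs <;> omega
      rw [if_neg hk15]
      rw [scan_cons]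
      by_cases hk16 : n ≥ (1000 : Int)
      · rw [if_pos hk16]; split_ifs <;> omega
      rw [if_neg hk16]
      rw [scan_cons]
      by_cases hk17 : n ≥ (900 : Int)
      · rw [if_pos hk17]; split_ifs <;> omega
      rw [if_neg hk17]
      rw [scan_cons]
      by_cases hk18 : n ≥ (800 : Int)
      · rw [if_pos hk18]; split_ifs <;> omega
      rw [if_neg hk18]
      rw [scan_cons]
      by_cases hk19 : n ≥ (700 : Int)
      · rw [if_pos hk19]; split_ifs <;> omega
      rw [if_neg hk19]
      rw [scan_cons]
      by_cases hk20 : n ≥ (600 : Int)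
      · rw [if_pos hk20]; split_ifs <;> omega
      rw [if_neg hk20]
      rw [scan_cons]
      by_cases hk21 : n ≥ (500 : Int)
      · rw [if_pos hk21]; split_ifs <;> omega
      rw [if_neg hk21]
      rw [scan_cons]
      by_cases hk22 : n ≥ (400 : Int)
      · rw [if_pos hk22]; split_ifs <;> omega
      rw [if_neg hk22]
      rw [scan_cons]
      by_cases hk23 : n ≥ (300 : Int)
      · rw [if_pos hk23]; split_ifs <;> omega
      rw [if_neg hk23]
      rw [scan_cons]
      by_cases hk24 : n ≥ (200 : Int)
      · rw [if_pos hk24]; split_ifs <;> omega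
      rw [if_neg hk24]
      rw [scan_cons]
      by_cases hk25 : n ≥ (100 : Int)
      · rw [if_pos hk25]; split_ifs <;> omega
      rw [if_neg hk25]
      rw [scan_cons]
      by_cases hk26 : n ≥ (0 : Int)
      · rw [if_pos hk26]; split_ifs <;> omega
      rw [if_neg hk26]
      rw [scan_nil]; split_ifs <;> omega
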